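-- pv_equiv track=rewrite | github.com/paivaspol/WebpageOptimizationScripts | web_complexity/debug_replay/common.py | GetFrameBreakdown
-- ===== SOURCE A (Python) =====
-- def GetFrameBreakdown(sorted_requests, main_frame_id):
--     '''Returns a tuple of ( list(first_party resources), dict[iframe] -->
--     list(resources) ).
--
--     This assumes that sorted_requests: (url, request ts (ms), frame_id) on
--     the request ts.'''
--     from collections import defaultdict
--
--     seen_frames = set()
--     first_party = []
--     third_party = defaultdict(list)
--     frame_id_to_iframe_url = {}
--     for url, _, frame_id, referer in sorted_requests:
--         iframe_id = (frame_id, referer)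
--         if frame_id not in seen_frames:
--             seen_frames.add(frame_id)
--             frame_id_to_iframe_url[frame_id] = url if frame_id != '-1' else '[NOT_FOUND]'
--         if frame_id == main_frame_id:
--             first_party.append(url)
--         else:
--             third_party[frame_id_to_iframe_url[frame_id]].append(url)
--     return (first_party, third_party)
-- ===== SOURCE B (Python) =====
-- def GetFrameBreakdown(sorted_requests, main_frame_id):
--     '''Group-by formulation: no seen-set and no incrementally built frame index.
--     Each third-party request is labelled with its iframe url by a direct
--     first-occurrence search, and each bucket is built by a per-key
--     comprehension over the labelled requests.'''
--     from collections import defaultdict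
--
--     def iframe_url(frame_id):
--         if frame_id == '-1':
--             return '[NOT_FOUND]'
--         return next(url for url, _, f, _ in sorted_requests if f == frame_id)
--
--     first_party = [url for url, _, f, _ in sorted_requests if f == main_frame_id]
--
--     labelled = [(url, iframe_url(f))
--                 for url, _, f, _ in sorted_requests if f != main_frame_id]
--     keys = list(dict.fromkeys(k for _, k in labelled))
--     third_party = defaultdict(
--         list, {k: [url for url, kk in labelled if kk == k] for k in keys})
--     return (first_party, third_party)
-- ===== Notes on version B (the rewrite author's own statement) =====
-- stated objective: alternative
-- what changed: Replaces A's single streaming pass with its seen-set and incrementally built frame_id->url map by a declarative group-by: each third-party request is labelled with its iframe url by a direct first-occurrence search of the request list, the key order comes from dict.fromkeys, and every bucket is a per-key comprehension over the labelled requests; no mutable index is maintained.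
import Mathlib
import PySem

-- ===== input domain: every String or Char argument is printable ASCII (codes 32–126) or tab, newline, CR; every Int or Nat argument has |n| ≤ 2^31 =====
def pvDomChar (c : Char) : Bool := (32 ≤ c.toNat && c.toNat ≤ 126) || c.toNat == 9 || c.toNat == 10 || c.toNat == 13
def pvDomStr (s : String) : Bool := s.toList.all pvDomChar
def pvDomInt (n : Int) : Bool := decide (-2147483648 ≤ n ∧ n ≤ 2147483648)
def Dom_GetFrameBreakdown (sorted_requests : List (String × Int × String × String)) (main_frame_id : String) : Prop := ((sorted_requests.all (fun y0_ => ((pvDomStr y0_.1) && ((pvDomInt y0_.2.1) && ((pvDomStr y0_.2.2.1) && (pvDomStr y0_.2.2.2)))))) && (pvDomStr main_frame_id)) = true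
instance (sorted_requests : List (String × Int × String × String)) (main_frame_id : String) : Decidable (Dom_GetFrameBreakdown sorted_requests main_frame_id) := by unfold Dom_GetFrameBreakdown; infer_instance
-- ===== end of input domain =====

-- B replaces A's streaming pass with mutable seen-set/frame-index by a declarative group-by (label each third-party request by direct first-occurrence search, then per-key comprehensions); objective: alternative (not faster).


-- ===== PORT A =====
-- A's loop state: (seen_frames, first_party, third_party, frame_id_to_iframe_url)
def pvStateA := PySem.Set String × List String × PySem.Dict String (List String) × PySem.Dict String String

def pvStepA (main_frame_id : String) (st : pvStateA) (r : String × Int × String × String) : pvStateA :=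
  let url := r.1
  let frame_id := r.2.2.1
  let seen := st.1
  let fp := st.2.1
  let tp := st.2.2.1
  let m := st.2.2.2
  -- if frame_id not in seen_frames: add it and record its iframe url
  let seen' := if PySem.Set.contains seen frame_id then seen else PySem.Set.add seen frame_id
  let m' := if PySem.Set.contains seen frame_id then m
            else m.insert frame_id (if frame_id ≠ "-1" then url else "[NOT_FOUND]")
  if frame_id = main_frame_id then (seen', fp ++ [url], tp, m')
  else (seen', fp, tp.modify (m'.getD frame_id "") [] (· ++ [url]), m')

def GetFrameBreakdown (sorted_requests : List (String × Int × String × String)) (main_frame_id : String) : List String × (List (String × List String)) :=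
  let st := sorted_requests.foldl (pvStepA main_frame_id)
    (PySem.Set.empty, [], PySem.Dict.empty, PySem.Dict.empty)
  (st.2.1, st.2.2.1.items)

-- ===== PORT B =====
-- iframe_url(frame_id): '-1' collapses to '[NOT_FOUND]', else the url of the first request of that frame
-- (next(...) on the generator; the `none` branch is next()'s StopIteration, unreachable for frame_ids occurring in sorted_requests)
def pvIframeUrl (sorted_requests : List (String × Int × String × String)) (frame_id : String) : String :=
  if frame_id = "-1" then "[NOT_FOUND]"
  else match sorted_requests.find? (fun r => r.2.2.1 == frame_id) with
       | some r => r.1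
       | none => ""

def GetFrameBreakdown_alt (sorted_requests : List (String × Int × String × String)) (main_frame_id : String) : List String × (List (String × List String)) :=
  let first_party := (sorted_requests.filter (fun r => r.2.2.1 == main_frame_id)).map (fun r => r.1)
  let labelled := (sorted_requests.filter (fun r => r.2.2.1 != main_frame_id)).map
    (fun r => (r.1, pvIframeUrl sorted_requests r.2.2.1))
  let keys := PySem.List.dedup (labelled.map (fun p => p.2))           -- dict.fromkeys
  let third_party := keys.map (fun k => (k, (labelled.filter (fun p => p.2 == k)).map (fun p => p.1)))
  (first_party, third_party)

-- ===== PRECONDITION & SPEC =====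
def Spec_GetFrameBreakdown (sorted_requests : List (String × Int × String × String)) (main_frame_id : String) (out : List String × (List (String × List String))) : Prop := out = GetFrameBreakdown_alt sorted_requests main_frame_id
instance (sorted_requests : List (String × Int × String × String)) (main_frame_id : String) (out : List String × (List (String × List String))) : Decidable (Spec_GetFrameBreakdown sorted_requests main_frame_id out) := by unfold Spec_GetFrameBreakdown; infer_instance

-- ===== CLAIM (what is proved, stated in full; the proofs are below) =====
def Claim_equal_GetFrameBreakdown : Prop := ∀ (sorted_requests : List (String × Int × String × String)) (main_frame_id : String), Dom_GetFrameBreakdown sorted_requests main_frame_id → Spec_GetFrameBreakdown sorted_requests main_frame_id (GetFrameBreakdown sorted_requests main_frame_id)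

-- ===== LEMMAS AND PROOFS =====

-- proof-side abbreviation for A's frame_id -> iframe-url map update
def pvMStep (m : PySem.Dict String String) (r : String × Int × String × String) : PySem.Dict String String :=
  if m.contains r.2.2.1 then m
  else m.insert r.2.2.1 (if r.2.2.1 ≠ "-1" then r.1 else "[NOT_FOUND]")

-- the first match of a predicate false on the prefix and true at the head of the suffix
lemma find?_first (pre rest : List (String × Int × String × String))
    (r : String × Int × String × String) (fid : String)
    (hpre : ∀ x ∈ pre, x.2.2.1 ≠ fid) (hr : r.2.2.1 = fid) :
    (pre ++ r :: rest).find? (fun x => x.2.2.1 == fid) = some r := by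
  rw [List.find?_append]
  have h1 : pre.find? (fun x => x.2.2.1 == fid) = none := by
    rw [List.find?_eq_none]
    intro x hx; simpa using hpre x hx
  rw [h1, Option.none_or]
  have hp : (fun x => x.2.2.1 == fid) r = true := by simpa using hr
  simp [hp]

-- main invariant: A's fold, started after the prefix `pre` with the map m holding exactly
-- pre's frame_ids with their iframe urls, splits into the three independent computations
lemma A_fold_char (reqs : List (String × Int × String × String)) (main : String) :
    ∀ (l pre : List (String × Int × String × String)), reqs = pre ++ l →
    ∀ (m : PySem.Dict String String) (fp : List String) (tp : PySem.Dict String (List String)),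
    (∀ fid, m.contains fid = true ↔ fid ∈ pre.map (fun r => r.2.2.1)) →
    (∀ fid ∈ pre.map (fun r => r.2.2.1), m.getD fid "" = pvIframeUrl reqs fid) →
    l.foldl (pvStepA main) (m.keys, fp, tp, m) =
      ((l.foldl pvMStep m).keys,
       fp ++ (l.filter (fun r => r.2.2.1 == main)).map (fun r => r.1),
       (l.filter (fun r => r.2.2.1 != main)).foldl
         (fun tp r => tp.modify (pvIframeUrl reqs r.2.2.1) [] (· ++ [r.1])) tp,
       l.foldl pvMStep m) := by
  intro l
  induction l with
  | nil => intro pre h m fp tp hm hv; simp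
  | cons r rest ih =>
    intro pre h m fp tp hm hv
    obtain ⟨url, ts, fid, ref⟩ := r
    simp only [List.foldl_cons, List.filter_cons]
    by_cases hc : m.contains fid = true
    · -- frame_id already recorded
      have hmem : fid ∈ m.keys := (PySem.Dict.contains_iff_mem_keys m fid).mp hc
      have hfid : fid ∈ pre.map (fun r => r.2.2.1) := (hm fid).mp hc
      have hgd : m.getD fid "" = pvIframeUrl reqs fid := hv fid hfid
      have hmstep : pvMStep m (url, ts, fid, ref) = m := by simp [pvMStep, hc]
      have hpre' : reqs = (pre ++ [(url, ts, fid, ref)]) ++ rest := by simpa using h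
      have hm' : ∀ f, m.contains f = true ↔ f ∈ (pre ++ [(url, ts, fid, ref)]).map (fun r => r.2.2.1) := by
        intro f
        simp only [List.map_append, List.mem_append, List.map_cons, List.map_nil, List.mem_cons]
        constructor
        · intro hf; exact Or.inl ((hm f).mp hf)
        · rintro (hf | hf | hf)
          · exact (hm f).mpr hf
          · exact hf ▸ hc
          · cases hf
      have hv' : ∀ f ∈ (pre ++ [(url, ts, fid, ref)]).map (fun r => r.2.2.1),
          m.getD f "" = pvIframeUrl reqs f := by
        intro f hf
        simp only [List.map_append, List.mem_append, List.map_cons, List.map_nil, List.mem_cons] at hf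
        rcases hf with hf | hf | hf
        · exact hv f hf
        · exact hf ▸ hgd
        · cases hf
      by_cases hmain : fid = main
      · have hstep : pvStepA main (m.keys, fp, tp, m) (url, ts, fid, ref) =
            (m.keys, fp ++ [url], tp, m) := by
          simp [pvStepA, PySem.Set.contains, hmain, hmain ▸ hmem]
        rw [hstep, ih _ hpre' m (fp ++ [url]) tp hm' hv', hmstep]
        simp [hmain]
      · have hstep : pvStepA main (m.keys, fp, tp, m) (url, ts, fid, ref) =
            (m.keys, fp, tp.modify (m.getD fid "") [] (· ++ [url]), m) := by
          simp [pvStepA, PySem.Set.contains, hmem, hmain]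
        rw [hstep, ih _ hpre' m fp _ hm' hv', hmstep]
        simp [hmain, hgd]
    · -- first occurrence of this frame_id
      have hcb : m.contains fid = false := by simpa using hc
      have hmem : fid ∉ m.keys := fun hk => hc ((PySem.Dict.contains_iff_mem_keys m fid).mpr hk)
      have hfid : fid ∉ pre.map (fun r => r.2.2.1) := fun hf => hc ((hm fid).mpr hf)
      set v := if fid ≠ "-1" then url else "[NOT_FOUND]" with hvdef
      have hkey : pvIframeUrl reqs fid = v := by
        by_cases h1 : fid = "-1"
        · simp [pvIframeUrl, h1, hvdef]
        · have hfind : reqs.find? (fun x => x.2.2.1 == fid) = some (url, ts, fid, ref) := by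
            rw [h]
            exact find?_first pre rest _ fid
              (fun x hx he => hfid (he ▸ List.mem_map_of_mem hx)) rfl
          simp [pvIframeUrl, h1, hfind, hvdef]
      have hmstep : pvMStep m (url, ts, fid, ref) = m.insert fid v := by
        simp [pvMStep, hcb, hvdef]
      have hkeys : (m.insert fid v).keys = PySem.Set.add m.keys fid := by
        rw [PySem.Dict.keys_insert_of_not_contains _ _ hcb]
        simp [PySem.Set.add, PySem.Set.contains, hmem]
      have hpre' : reqs = (pre ++ [(url, ts, fid, ref)]) ++ rest := by simpa using h
      have hm' : ∀ f, (m.insert fid v).contains f = true ↔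
          f ∈ (pre ++ [(url, ts, fid, ref)]).map (fun r => r.2.2.1) := by
        intro f
        rw [PySem.Dict.contains_insert]
        simp only [List.map_append, List.mem_append, List.map_cons, List.map_nil, List.mem_cons]
        constructor
        · intro hf
          rcases Bool.or_eq_true_iff.mp hf with hf | hf
          · exact Or.inr (Or.inl (by simpa using hf))
          · exact Or.inl ((hm f).mp hf)
        · rintro (hf | hf | hf)
          · exact Bool.or_eq_true_iff.mpr (Or.inr ((hm f).mpr hf))
          · exact Bool.or_eq_true_iff.mpr (Or.inl (by simpa using hf))
          · cases hf
      have hv' : ∀ f ∈ (pre ++ [(url, ts, fid, ref)]).map (fun r => r.2.2.1),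
          (m.insert fid v).getD f "" = pvIframeUrl reqs f := by
        intro f hf
        simp only [List.map_append, List.mem_append, List.map_cons, List.map_nil, List.mem_cons] at hf
        rcases hf with hf | hf | hf
        · have hne : f ≠ fid := fun he => hfid (he ▸ hf)
          rw [PySem.Dict.getD_insert]
          simp only [if_neg hne]
          exact hv f hf
        · subst hf; rw [PySem.Dict.getD_insert_self]; exact hkey.symm
        · cases hf
      have hgd : (m.insert fid v).getD fid "" = v := PySem.Dict.getD_insert_self _ _ _ _
      by_cases hmain : fid = main
      · have hstep : pvStepA main (m.keys, fp, tp, m) (url, ts, fid, ref) =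
            ((m.insert fid v).keys, fp ++ [url], tp, m.insert fid v) := by
          simp only [pvStepA, hkeys]
          simp [PySem.Set.contains, hmain, hmain ▸ hmem, hvdef]
        rw [hstep, ih _ hpre' _ (fp ++ [url]) tp hm' hv', hmstep]
        simp [hmain]
      · have hstep : pvStepA main (m.keys, fp, tp, m) (url, ts, fid, ref) =
            ((m.insert fid v).keys, fp, tp.modify v [] (· ++ [url]), m.insert fid v) := by
          simp only [pvStepA, hkeys]
          simp [PySem.Set.contains, hmem, hmain, hvdef]
        rw [hstep, ih _ hpre' _ fp _ hm' hv', hmstep]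
        simp [hmain, hkey]

-- ===== VERDICT (by name: the statement is the Claim_ definition above) =====
theorem GetFrameBreakdown_spec : Claim_equal_GetFrameBreakdown := by
  intro reqs main _
  unfold Spec_GetFrameBreakdown GetFrameBreakdown GetFrameBreakdown_alt
  have h := A_fold_char reqs main reqs [] rfl PySem.Dict.empty [] PySem.Dict.empty
    (by intro fid; simp [PySem.Dict.contains_empty]) (by intro fid hf; cases hf)
  simp only [show (PySem.Dict.empty : PySem.Dict String String).keys = PySem.Set.empty from rfl] at h
  rw [h]
  -- first_party components agree definitionally; it remains to identify the third_party items
  set key : (String × Int × String × String) → String := fun r => pvIframeUrl reqs r.2.2.1 with hkeydef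
  set F := reqs.filter (fun r => r.2.2.1 != main) with hF
  have hfold : F.foldl (fun tp r => tp.modify (key r) [] (· ++ [r.1])) PySem.Dict.empty =
      (F.map (fun r => (key r, r.1))).foldl
        (fun d p => d.modify p.1 [] (· ++ [p.2])) PySem.Dict.empty := by
    rw [List.foldl_map]
  set P := F.map (fun r => (key r, r.1)) with hP
  have hnodup : ((P.foldl (fun d p => d.modify p.1 [] (· ++ [p.2])) PySem.Dict.empty)).keys.Nodup := by
    apply PySem.Dict.nodup_keys_foldl_modify_key
    simp
  have hkeys : ((P.foldl (fun d p => d.modify p.1 [] (· ++ [p.2])) PySem.Dict.empty)).keys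
      = PySem.Set.ofList (P.map (fun p => p.1)) := by
    rw [PySem.Dict.keys_foldl_modify_key]
    simp [PySem.Set.update_nil_left]
  have hgetD : ∀ k, ((P.foldl (fun d p => d.modify p.1 [] (· ++ [p.2])) PySem.Dict.empty)).getD k []
      = (P.filter (fun p => p.1 == k)).map (fun p => p.2) := by
    intro k
    rw [PySem.Dict.getD_foldl_modify_append]
    simp
  have hitems : (F.foldl (fun tp r => tp.modify (key r) [] (· ++ [r.1])) PySem.Dict.empty).items
      = (PySem.Set.ofList (F.map key)).map
          (fun k => (k, (F.filter (fun r => key r == k)).map (fun r => r.1))) := by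
    rw [hfold, PySem.Dict.items_eq_map_keys _ hnodup ([] : List String), hkeys]
    congr 1
    · funext k
      rw [hgetD k]
      simp [hP, List.filter_map, List.map_map]
      rfl
    · simp [hP, List.map_map]
      rfl
  -- B's side: labelled / keys / buckets reduce to the same expressions
  simp only [List.map_map, List.filter_map, Function.comp_def,
    show ∀ xs : List String, PySem.List.dedup xs = PySem.Set.ofList xs from fun _ => rfl]
  rw [List.nil_append]
  exact congrArg _ hitems
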